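-- pv_equiv track=rewrite | github.com/williamwbush/codewars | testing/test8.py | mode_2
-- ===== SOURCE A (Python) =====
-- def mode_2(lst):
--     dct = {}
--     for n in lst:
--         if n in dct.keys():
--             dct[n] += 1
--         else:
--             dct[n] = 1
--     n = 0
--     for key, value in dct.items():
--         if value > abs(n):
--             n = value
--             m = key
--         elif value == abs(n):
--             n = -value
--     return m if n > 0 else None
-- ===== SOURCE B (Python) =====
-- def mode_2(lst):
--     counts = {}
--     for n in lst:
--         counts[n] = counts.get(n, 0) + 1
--     if not counts:
--         return None
--     maxf = max(counts.values())
--     winners = [k for k, v in counts.items() if v == maxf]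
--     return winners[0] if len(winners) == 1 else None
-- ===== Notes on version B (the rewrite author's own statement) =====
-- stated objective: simpler
-- what changed: Replaces A's single-pass selection whose accumulator encodes the running max, the winning key and a tie flag in the sign of one integer with an explicit max-then-filter second phase: compute the maximum frequency, collect the keys attaining it, return the key iff it is unique.
import Mathlib
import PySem

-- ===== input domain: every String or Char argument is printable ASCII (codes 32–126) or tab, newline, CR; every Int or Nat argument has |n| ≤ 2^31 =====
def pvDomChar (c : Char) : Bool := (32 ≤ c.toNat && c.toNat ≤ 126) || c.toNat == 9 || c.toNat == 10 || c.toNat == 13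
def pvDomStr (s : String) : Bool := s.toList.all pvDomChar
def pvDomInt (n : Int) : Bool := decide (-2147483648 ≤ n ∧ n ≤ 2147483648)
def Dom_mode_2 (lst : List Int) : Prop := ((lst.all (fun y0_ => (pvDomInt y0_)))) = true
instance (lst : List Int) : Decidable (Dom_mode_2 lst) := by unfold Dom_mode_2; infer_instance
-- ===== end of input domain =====

-- B replaces A's sign-trick single-pass mode selection with an explicit max-then-filter-winners phase (simpler decomposition, same cost).


-- ===== PORT A =====
-- the one-pass selection step: n holds ±(running max), sign = tie flag; m the current winner
def modeStepA (s : Int × Int) (kv : Int × Int) : Int × Int :=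
  if kv.2 > |s.1| then (kv.2, kv.1)
  else if kv.2 = |s.1| then (-kv.2, s.2)
  else s

def mode_2 (lst : List Int) : Option Int :=
  let dct := lst.foldl
    (fun d n => if d.contains n then d.insert n (d.getD n 0 + 1) else d.insert n 1)
    (PySem.Dict.empty : PySem.Dict Int Int)
  -- m is only read when n > 0, which implies it was assigned; 0 is the unread placeholder
  let s := dct.items.foldl modeStepA (0, 0)
  if s.1 > 0 then some s.2 else none

-- ===== PORT B =====
def mode_2_alt (lst : List Int) : Option Int :=
  let counts := lst.foldl (fun d n => d.insert n (d.getD n 0 + 1))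
    (PySem.Dict.empty : PySem.Dict Int Int)
  match counts.values with
  | [] => none
  | v :: vs =>
    let maxf := vs.foldl max v        -- max(counts.values())
    let winners := (counts.items.filter (fun kv => kv.2 == maxf)).map (fun kv => kv.1)
    if winners.length = 1 then winners.head? else none

-- ===== PRECONDITION & SPEC =====
def Spec_mode_2 (lst : List Int) (out : Option Int) : Prop := out = mode_2_alt lst
instance (lst : List Int) (out : Option Int) : Decidable (Spec_mode_2 lst out) := by unfold Spec_mode_2; infer_instance

-- ===== CLAIM (what is proved, stated in full; the proofs are below) =====
def Claim_equal_mode_2 : Prop := ∀ (lst : List Int), Dom_mode_2 lst → Spec_mode_2 lst (mode_2 lst)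

-- ===== LEMMAS AND PROOFS =====

-- proof-side abbreviations for A's fold characterisation
def maxsnd (L : List (Int × Int)) (a : Int) : Int := L.foldl (fun acc p => max acc p.2) a
def cntv (L : List (Int × Int)) (v : Int) : Nat := L.countP (fun p => p.2 = v)
def key1 (L : List (Int × Int)) (v : Int) : Int :=
  ((L.filter (fun p => p.2 == v)).map (fun p => p.1)).headD 0

lemma maxsnd_cons (p : Int × Int) (L : List (Int × Int)) (a : Int) :
    maxsnd (p :: L) a = maxsnd L (max a p.2) := rfl

lemma le_maxsnd (L : List (Int × Int)) (a : Int) :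
    a ≤ maxsnd L a ∧ ∀ p ∈ L, p.2 ≤ maxsnd L a := by
  have h := PySem.List.le_foldl_max_int L (fun p => p.2) a
  exact ⟨h.1, h.2⟩

lemma maxsnd_eq_foldl_map (tl : List (Int × Int)) (a : Int) :
    (tl.map (fun p => p.2)).foldl max a = maxsnd tl a := by
  rw [List.foldl_map]; rfl

lemma cntv_cons (p : Int × Int) (L : List (Int × Int)) (v : Int) :
    cntv (p :: L) v = cntv L v + (if p.2 = v then 1 else 0) := by
  simp [cntv, List.countP_cons]

lemma key1_cons (p : Int × Int) (L : List (Int × Int)) (v : Int) :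
    key1 (p :: L) v = if p.2 = v then p.1 else key1 L v := by
  by_cases h : p.2 = v <;> simp [key1, h]

-- both counting loops build the same dict (A's membership test is redundant)
lemma countA_eq_counter (lst : List Int) :
    lst.foldl (fun d n => if d.contains n then d.insert n (d.getD n 0 + 1) else d.insert n 1)
      (PySem.Dict.empty : PySem.Dict Int Int) = PySem.Dict.counter lst := by
  rw [← PySem.Dict.foldl_insert_getD_add_one_eq_counter]
  apply PySem.List.foldl_congr_mem
  intro d n _
  by_cases h : d.contains n
  · simp [h]
  · rw [if_neg (by simp [h]), PySem.Dict.getD_of_not_contains d 0 (by simpa using h)]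
    norm_num

-- characterisation of A's fold: the first component is ±(overall max of snds, seeded with |n|),
-- sign recording uniqueness; the second is the first key attaining that max
lemma foldA_char (L : List (Int × Int)) (hL : ∀ p ∈ L, 0 < p.2) :
    ∀ n m : Int,
    L.foldl modeStepA (n, m) =
      (if maxsnd L |n| > |n| then
         ((if cntv L (maxsnd L |n|) = 1 then maxsnd L |n| else -(maxsnd L |n|)),
          key1 L (maxsnd L |n|))
       else if 0 < cntv L |n| then (-|n|, m)
       else (n, m)) := by
  induction L with
  | nil => intro n m; simp [maxsnd, cntv]
  | cons hd tl ih =>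
    intro n m
    have hv : 0 < hd.2 := hL hd List.mem_cons_self
    have hL' : ∀ p ∈ tl, 0 < p.2 := fun p hp => hL p (List.mem_cons_of_mem _ hp)
    have ihs := ih hL'
    rw [List.foldl_cons]
    rw [show modeStepA (n, m) hd
        = (if hd.2 > |n| then (hd.2, hd.1) else if hd.2 = |n| then (-hd.2, m) else (n, m)) from rfl]
    by_cases h1 : hd.2 > |n|
    · rw [if_pos h1, ihs hd.2 hd.1, maxsnd_cons, max_eq_right (le_of_lt h1)]
      rw [show |hd.2| = hd.2 from abs_of_pos hv]
      set M := maxsnd tl hd.2 with hM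
      have hvM : hd.2 ≤ M := (le_maxsnd tl hd.2).1
      have hMn : M > |n| := lt_of_lt_of_le h1 hvM
      rw [if_pos hMn, cntv_cons, key1_cons]
      by_cases h2 : M > hd.2
      · have hne : ¬ (hd.2 = M) := by omega
        simp [h2, hne]
      · have hMe : M = hd.2 := le_antisymm (by omega) hvM
        by_cases h3 : 0 < cntv tl hd.2
        · have hc : ¬ (cntv tl M + (if hd.2 = M then 1 else 0) = 1) := by
            simp [hMe]; omega
          simp [hMe]
          rw [if_pos h3, if_neg (show ¬ cntv tl hd.2 = 0 by omega)]
        · have hc0 : cntv tl hd.2 = 0 := by omega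
          simp [hMe, hc0]
    · rw [if_neg h1]
      by_cases h2 : hd.2 = |n|
      · rw [if_pos h2, ihs (-hd.2) m,
            show |(-hd.2)| = |n| by rw [abs_neg, abs_of_pos hv, h2],
            maxsnd_cons, max_eq_left (by omega), cntv_cons, key1_cons]
        set M := maxsnd tl |n| with hM
        have hnM : |n| ≤ M := (le_maxsnd tl |n|).1
        by_cases h3 : M > |n|
        · have hne : ¬ (hd.2 = M) := by omega
          simp [h3, hne]
        · have hMe : M = |n| := le_antisymm (by omega) hnM
          rw [if_neg h3, if_neg (by omega : ¬ M > |n|)]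
          rw [cntv_cons hd tl |n|]
          by_cases h4 : 0 < cntv tl |n|
          · simp [h4, h2]
          · simp [h4, h2]
      · rw [if_neg h2, ihs n m, maxsnd_cons, max_eq_left (by omega), cntv_cons, key1_cons]
        set M := maxsnd tl |n| with hM
        have hnM : |n| ≤ M := (le_maxsnd tl |n|).1
        have hlt : hd.2 < |n| := by omega
        have hne : ¬ (hd.2 = M) := by omega
        simp [cntv_cons, hne, h2]

-- the max is attained by some pair
lemma maxsnd_attained (hd : Int × Int) (tl : List (Int × Int)) :
    ∃ p ∈ (hd :: tl), p.2 = maxsnd tl hd.2 := by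
  rcases PySem.List.foldl_max_mem (tl.map (fun p => p.2)) hd.2 with h | h
  · refine ⟨hd, List.mem_cons_self, ?_⟩
    rw [← maxsnd_eq_foldl_map]; omega
  · rw [maxsnd_eq_foldl_map] at h
    obtain ⟨p, hp, hpe⟩ := List.mem_map.mp h
    exact ⟨p, List.mem_cons_of_mem _ hp, hpe⟩

-- ===== VERDICT (by name: the statement is the Claim_ definition above) =====
theorem mode_2_spec : Claim_equal_mode_2 := by
  intro lst _
  simp only [Spec_mode_2, mode_2, mode_2_alt]
  rw [countA_eq_counter, PySem.Dict.foldl_insert_getD_add_one_eq_counter]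
  have hLpos : ∀ p ∈ (PySem.Dict.counter lst).items, 0 < p.2 := by
    intro p hp
    rw [PySem.Dict.items_counter] at hp
    obtain ⟨k, hk, rfl⟩ := List.mem_map.mp hp
    have : k ∈ lst := (PySem.Set.mem_ofList _ _).mp hk
    simpa using List.count_pos_iff.mpr this
  rw [foldA_char _ hLpos 0 0]
  rw [show (PySem.Dict.counter lst).values
      = ((PySem.Dict.counter lst).items).map (fun p => p.2) from rfl]
  cases hL : (PySem.Dict.counter lst).items with
  | nil => simp [maxsnd, cntv]
  | cons hd tl =>
    have hv : 0 < hd.2 := hLpos hd (by rw [hL]; exact List.mem_cons_self)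
    simp only [List.map_cons]
    have hfold : (tl.map (fun p => p.2)).foldl max hd.2 = maxsnd tl hd.2 :=
      maxsnd_eq_foldl_map tl hd.2
    have hM0 : maxsnd (hd :: tl) |(0 : Int)| = maxsnd tl hd.2 := by
      rw [maxsnd_cons]; congr 1; simp; omega
    set M := maxsnd tl hd.2 with hMdef
    have hvM : hd.2 ≤ M := (le_maxsnd tl hd.2).1
    have hMpos : M > |(0 : Int)| := by simp; omega
    rw [hM0, if_pos hMpos, hfold]
    have hlen : ((hd :: tl).filter (fun kv => kv.2 == M)).length = cntv (hd :: tl) M := by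
      rw [← List.countP_eq_length_filter, cntv]
      exact List.countP_congr (fun p _ => by simp)
    rw [List.length_map, hlen]
    by_cases hc : cntv (hd :: tl) M = 1
    · rw [if_pos hc, if_pos hc, if_pos (by omega : M > 0)]
      have hfpos : 0 < ((hd :: tl).filter (fun kv => kv.2 == M)).length := by omega
      cases hf : (hd :: tl).filter (fun kv => kv.2 == M) with
      | nil => rw [hf] at hfpos; simp at hfpos
      | cons w ws => simp [key1, hf]
    · rw [if_neg hc, if_neg hc]
      have hmem : 0 < cntv (hd :: tl) M := by
        obtain ⟨p, hp, he⟩ := maxsnd_attained hd tl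
        exact List.countP_pos_iff.mpr ⟨p, hp, by simp [he, hMdef]⟩
      rw [if_neg (by omega : ¬ (-M > 0))]
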